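-- pv_equiv track=rewrite | github.com/BrianRivera524/PrefixWordSearch | search.py | linear_search_prefix
-- ===== SOURCE A (Python) =====
-- def linear_search_prefix(sorted_words, prefix):
--     """
--     Performs a linear search on a sorted list of words to find the
--     start and end indices (inclusive) of the range of words that start with a
--     given prefix.
--
--     Args:
--         sorted_words: A sorted list of strings (words).
--         prefix: The prefix string to search for.
--
--     Returns:
--         A tuple containing the start and end indices (inclusive) of the range
--         of words starting with the prefix. Returns (-1, -1) if no words
--         with the given prefix are found.
--     """
--     # Part 1 - Implement!
--     start, end = -1, -1
--     for i in range(len(sorted_words)): # for i, word in enumerate(sorted_words):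
--         if sorted_words[i].startswith(prefix):
--             if start == -1:
--                 start = i
--             end = i
--         elif start != -1:
--             break
--
--     return (start,end)
-- ===== SOURCE B (Python) =====
-- def _first_not(sorted_words, pred, lo, hi):
--     """Least index i in [lo, hi) with not pred(sorted_words[i]), or hi if none."""
--     while lo < hi:
--         mid = (lo + hi) // 2
--         if pred(sorted_words[mid]):
--             lo = mid + 1
--         else:
--             hi = mid
--     return lo
--
--
-- def linear_search_prefix(sorted_words, prefix):
--     """Binary search: the words starting with `prefix` form a contiguous block
--     in a sorted list, delimited below by the words < prefix and above by the
--     first word >= prefix that does not start with it."""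
--     n = len(sorted_words)
--     start = _first_not(sorted_words, lambda w: w < prefix, 0, n)
--     end = _first_not(sorted_words, lambda w: w.startswith(prefix), start, n) - 1
--     if end < start:
--         return (-1, -1)
--     return (start, end)
-- ===== Notes on version B (the rewrite author's own statement) =====
-- stated objective: faster
-- what changed: Replaces A's linear scan with two binary searches (hand-rolled bisect): lower bound = first word not < prefix, upper bound = first word beyond it not starting with prefix; correct because prefix matches form a contiguous block in a sorted list.
-- outside the precondition, e.g. on linear_search_prefix(['b', 'a'], 'a'): A returns (1, 1), B returns (0, 1)
import Mathlib
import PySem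

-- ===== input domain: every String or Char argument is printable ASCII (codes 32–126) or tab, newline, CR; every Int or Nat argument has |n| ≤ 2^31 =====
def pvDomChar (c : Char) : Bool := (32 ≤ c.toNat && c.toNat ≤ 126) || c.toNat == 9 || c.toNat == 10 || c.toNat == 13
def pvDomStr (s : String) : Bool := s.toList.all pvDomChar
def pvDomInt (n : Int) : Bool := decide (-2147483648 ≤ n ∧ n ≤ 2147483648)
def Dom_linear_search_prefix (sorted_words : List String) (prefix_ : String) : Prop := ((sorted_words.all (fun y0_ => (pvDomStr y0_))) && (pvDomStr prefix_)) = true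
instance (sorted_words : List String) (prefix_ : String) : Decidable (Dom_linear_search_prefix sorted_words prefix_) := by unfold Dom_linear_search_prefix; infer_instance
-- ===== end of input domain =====

-- B replaces A's O(n·m) linear scan by two O(m·log n) binary searches: in a sorted
-- list the words starting with the prefix form a contiguous block, delimited below
-- by the words < prefix and above by the first word ≥ prefix not starting with it.

-- ===== PORT A =====
-- A's loop over range(len(sorted_words)) with state (start, end) and a break.
def pvALoop (prefix_ : String) : List String → Int → Int → Int → Int × Int
  | [], _, start, end_ => (start, end_)
  | w :: rest, i, start, end_ =>
    if PySem.Str.startswith w prefix_ then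
      pvALoop prefix_ rest (i + 1) (if start = -1 then i else start) i
    else if start ≠ -1 then (start, end_)
    else pvALoop prefix_ rest (i + 1) start end_

def linear_search_prefix (sorted_words : List String) (prefix_ : String) : List Int :=
  let r := pvALoop prefix_ sorted_words 0 (-1) (-1)
  [r.1, r.2]

-- ===== PORT B =====
-- _first_not: the 'while lo < hi' bisection loop of Source B (index always in range,
-- so the pyGetD default is never read).
def pvFirstNot (sorted_words : List String) (pred : String → Bool) (lo hi : Int) : Int :=
  if _h : lo < hi then
    let mid := PySem.Int.floordiv (lo + hi) 2
    if pred (PySem.List.pyGetD sorted_words mid "") then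
      pvFirstNot sorted_words pred (mid + 1) hi
    else
      pvFirstNot sorted_words pred lo mid
  else lo
termination_by (hi - lo).toNat
decreasing_by
  · have _h1 := PySem.Int.le_floordiv_iff_mul_le (a := lo + hi) (q := lo) (by norm_num : (0:Int) < 2)
    have h2 := PySem.Int.floordiv_lt_iff_lt_mul (a := lo + hi) (q := hi) (by norm_num : (0:Int) < 2)
    omega
  · have _h1 := PySem.Int.le_floordiv_iff_mul_le (a := lo + hi) (q := lo) (by norm_num : (0:Int) < 2)
    have h2 := PySem.Int.floordiv_lt_iff_lt_mul (a := lo + hi) (q := hi) (by norm_num : (0:Int) < 2)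
    omega

-- Python's 'w < prefix' on str is code-point lexicographic = '<' on the char lists.
def linear_search_prefix_alt (sorted_words : List String) (prefix_ : String) : List Int :=
  let n : Int := sorted_words.length
  let start := pvFirstNot sorted_words (fun w => PySem.Chars.strLt w.toList prefix_.toList) 0 n
  let end_ := pvFirstNot sorted_words (fun w => PySem.Str.startswith w prefix_) start n - 1
  if end_ < start then [-1, -1] else [start, end_]

-- ===== PRECONDITION & SPEC =====
-- Pre_ is the prefix-block shape that A's docstring domain (a sorted list) always
-- guarantees, stated as the weakest such condition: the words < prefix form an
-- initial segment, and among the remaining words those starting with the prefix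
-- form an initial segment.  Every sorted list satisfies it; on lists without this
-- shape A still returns a value (its first contiguous run of matches) but B's
-- binary searches may land elsewhere.
def Pre_linear_search_prefix (sorted_words : List String) (prefix_ : String) : Prop :=
  List.Pairwise (fun a b =>
    (b.toList < prefix_.toList → a.toList < prefix_.toList) ∧
    (¬ a.toList < prefix_.toList → prefix_.toList <+: b.toList → prefix_.toList <+: a.toList))
    sorted_words
instance (sorted_words : List String) (prefix_ : String) : Decidable (Pre_linear_search_prefix sorted_words prefix_) := by unfold Pre_linear_search_prefix; infer_instance
def pvWitness_linear_search_prefix : List String × String := (["ab", "abc", "b"], "ab")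
def Spec_linear_search_prefix (sorted_words : List String) (prefix_ : String) (out : List Int) : Prop := out = linear_search_prefix_alt sorted_words prefix_
instance (sorted_words : List String) (prefix_ : String) (out : List Int) : Decidable (Spec_linear_search_prefix sorted_words prefix_ out) := by unfold Spec_linear_search_prefix; infer_instance

-- ===== CLAIM (what is proved, stated in full; the proofs are below) =====
def Claim_equal_linear_search_prefix : Prop := ∀ (sorted_words : List String) (prefix_ : String), Dom_linear_search_prefix sorted_words prefix_ → Pre_linear_search_prefix sorted_words prefix_ → Spec_linear_search_prefix sorted_words prefix_ (linear_search_prefix sorted_words prefix_)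

-- ===== LEMMAS AND PROOFS =====

-- ---- proof-side reference form of A: first match index + length of the run ----
def pvQ (prefix_ : String) (w : String) : Bool := PySem.Str.startswith w prefix_

def pvRef (ws : List String) (p : String) : Int × Int :=
  match List.findIdx? (pvQ p) ws with
  | none => (-1, -1)
  | some L => ((L : Int), (L : Int) + ((ws.drop (L + 1)).takeWhile (pvQ p)).length)

-- A-side helpers from the old find/run decomposition, used only in proofs.
def pvFind (p : String) : List String → Int → Option Int × List String
  | [], _ => (none, [])
  | w :: rest, i => if pvQ p w then (some i, rest) else pvFind p rest (i + 1)

def pvRun (p : String) : List String → Int → Int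
  | [], end_ => end_
  | w :: rest, end_ => if pvQ p w then pvRun p rest (end_ + 1) else end_

theorem pvALoop_found (prefix_ : String) (ws : List String) :
    ∀ (i s : Int), s ≠ -1 → pvALoop prefix_ ws i s (i - 1) = (s, pvRun prefix_ ws (i - 1)) := by
  induction ws with
  | nil => intro i s hs; simp [pvALoop, pvRun]
  | cons w rest ih =>
    intro i s hs
    simp only [pvALoop, pvRun, pvQ]
    by_cases h : PySem.Str.startswith w prefix_ = true
    · rw [if_pos h, if_pos h, if_neg hs]
      simpa using ih (i + 1) s hs
    · rw [if_neg h, if_neg h, if_pos hs]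

theorem pvALoop_search (prefix_ : String) (ws : List String) :
    ∀ (i : Int), 0 ≤ i →
    pvALoop prefix_ ws i (-1) (-1) =
      (match pvFind prefix_ ws i with
       | (none, _) => ((-1 : Int), (-1 : Int))
       | (some s, rest) => (s, pvRun prefix_ rest s)) := by
  induction ws with
  | nil => intro i _; simp [pvALoop, pvFind]
  | cons w rest ih =>
    intro i hi
    simp only [pvALoop, pvFind, pvQ]
    by_cases h : PySem.Str.startswith w prefix_ = true
    · rw [if_pos h, if_pos h]
      simp only [if_true]
      have hs : i ≠ -1 := by omega
      have := pvALoop_found prefix_ rest (i + 1) i hs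
      simpa using this
    · rw [if_neg h, if_neg h]
      simp only [ne_eq, not_true_eq_false, if_false]
      exact ih (i + 1) (by omega)

-- findIdx?/takeWhile characterisation of find/run
theorem pvFind_eq (p : String) (ws : List String) :
    ∀ i : Int, pvFind p ws i =
      (match List.findIdx? (pvQ p) ws with
       | none => (none, ([] : List String))
       | some k => (some (i + (k : Int)), ws.drop (k + 1))) := by
  induction ws with
  | nil => intro i; simp [pvFind]
  | cons w rest ih =>
    intro i
    simp only [pvFind, List.findIdx?_cons]
    by_cases h : pvQ p w = true
    · simp [h]
    · simp only [h, Bool.false_eq_true, if_false]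
      rw [ih (i + 1)]
      cases hk : List.findIdx? (pvQ p) rest with
      | none => simp
      | some k => simp; ring

theorem pvRun_eq (p : String) (ws : List String) :
    ∀ s : Int, pvRun p ws s = s + ((ws.takeWhile (pvQ p)).length : Int) := by
  induction ws with
  | nil => intro s; simp [pvRun]
  | cons w rest ih =>
    intro s
    simp only [pvRun, List.takeWhile]
    by_cases h : pvQ p w = true
    · simp [h, ih (s + 1)]; ring
    · simp [h]

theorem A_eq_ref (ws : List String) (p : String) :
    linear_search_prefix ws p = [(pvRef ws p).1, (pvRef ws p).2] := by
  unfold linear_search_prefix pvRef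
  rw [pvALoop_search p ws 0 le_rfl, pvFind_eq p ws 0]
  cases hk : List.findIdx? (pvQ p) ws with
  | none => simp
  | some k => simp [pvRun_eq]

-- ---- binary-search invariant: pvFirstNot returns the boundary of a downward-closed predicate ----
theorem pvFirstNot_spec (ws : List String) (pred : String → Bool) :
    ∀ (n : Nat) (lo hi : Int), (hi - lo).toNat ≤ n → 0 ≤ lo → lo ≤ hi →
    (∀ i j : Int, lo ≤ i → i ≤ j → j < hi →
        pred (PySem.List.pyGetD ws j "") = true → pred (PySem.List.pyGetD ws i "") = true) →
    lo ≤ pvFirstNot ws pred lo hi ∧ pvFirstNot ws pred lo hi ≤ hi ∧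
    (∀ i : Int, lo ≤ i → i < pvFirstNot ws pred lo hi → pred (PySem.List.pyGetD ws i "") = true) ∧
    (∀ i : Int, pvFirstNot ws pred lo hi ≤ i → i < hi → pred (PySem.List.pyGetD ws i "") = false) := by
  intro n
  induction n with
  | zero =>
    intro lo hi hn h0 hlh _hmono
    have hnl : ¬ lo < hi := by omega
    rw [pvFirstNot, dif_neg hnl]
    exact ⟨le_rfl, hlh, fun i h1 h2 => by omega, fun i h1 h2 => by omega⟩
  | succ n ih =>
    intro lo hi hn h0 hlh hmono
    by_cases h : lo < hi
    · rw [pvFirstNot, dif_pos h]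
      have hb1 := PySem.Int.le_floordiv_iff_mul_le (a := lo + hi) (q := lo) (by norm_num : (0:Int) < 2)
      have hb2 := PySem.Int.floordiv_lt_iff_lt_mul (a := lo + hi) (q := hi) (by norm_num : (0:Int) < 2)
      set mid := PySem.Int.floordiv (lo + hi) 2 with hmid
      have hm1 : lo ≤ mid := by omega
      have hm2 : mid < hi := by omega
      by_cases hp : pred (PySem.List.pyGetD ws mid "") = true
      · rw [if_pos hp]
        obtain ⟨c1, c2, c3, c4⟩ := ih (mid + 1) hi (by omega) (by omega) (by omega)
          (fun i j hi1 hi2 hi3 => hmono i j (by omega) hi2 hi3)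
        refine ⟨by omega, c2, fun i h1 h2 => ?_, c4⟩
        by_cases him : mid + 1 ≤ i
        · exact c3 i him h2
        · exact hmono i mid h1 (by omega) hm2 hp
      · rw [if_neg hp]
        obtain ⟨c1, c2, c3, c4⟩ := ih lo mid (by omega) h0 (by omega)
          (fun i j hi1 hi2 hi3 => hmono i j hi1 hi2 (by omega))
        refine ⟨c1, by omega, c3, fun i h1 h2 => ?_⟩
        by_cases him : i < mid
        · exact c4 i h1 him
        · cases hpi : pred (PySem.List.pyGetD ws i "") with
          | false => rfl
          | true => exact absurd (hmono mid i hm1 (by omega) h2 hpi) hp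
    · rw [pvFirstNot, dif_neg h]
      exact ⟨le_rfl, hlh, fun i h1 h2 => by omega, fun i h1 h2 => by omega⟩

-- ---- order facts: prefix matches form a contiguous block in lexicographic order ----
theorem prefix_not_lt (p : List Char) : ∀ t : List Char, ¬ (p ++ t) < p := by
  induction p with
  | nil => intro t; exact List.not_lt_nil t
  | cons c p ih =>
    intro t h
    rw [List.cons_append, List.cons_lt_cons_iff] at h
    rcases h with h | ⟨_, h⟩
    · exact lt_irrefl c h
    · exact ih t h

-- takeWhile length from an indexed description of the run
theorem takeWhile_length_eq {α : Type} (q : α → Bool) :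
    ∀ (l : List α) (k : Nat), k ≤ l.length →
    (∀ j (hj : j < l.length), j < k → q l[j] = true) →
    (∀ j (hj : j < l.length), k ≤ j → q l[j] = false) →
    (l.takeWhile q).length = k := by
  intro l
  induction l with
  | nil => intro k hk _ _; simp at hk; simp [hk]
  | cons a l ih =>
    intro k hk h1 h3
    cases k with
    | zero =>
      have := h3 0 (by simp) (by omega)
      simp at this
      simp [List.takeWhile, this]
    | succ k =>
      have ha := h1 0 (by simp) (by omega)
      simp at ha
      simp only [List.takeWhile, ha, List.length_cons]
      rw [ih k (by simpa using hk)
        (fun j hj hjk => by simpa using h1 (j + 1) (by simpa using hj) (by omega))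
        (fun j hj hjk => by simpa using h3 (j + 1) (by simpa using hj) (by omega))]

theorem B_eq_ref (ws : List String) (p : String)
    (hs : Pre_linear_search_prefix ws p) :
    linear_search_prefix_alt ws p = [(pvRef ws p).1, (pvRef ws p).2] := by
  unfold Pre_linear_search_prefix at hs
  have hC1 : ∀ (i j : Nat) (hi : i < ws.length) (hj : j < ws.length), i ≤ j →
      ws[j].toList < p.toList → ws[i].toList < p.toList := by
    intro i j hi hj hij hlt
    rcases Nat.lt_or_ge i j with h | h
    · exact (List.pairwise_iff_getElem.mp hs i j hi hj h).1 hlt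
    · have : i = j := by omega
      subst this; exact hlt
  have hC2 : ∀ (i j : Nat) (hi : i < ws.length) (hj : j < ws.length), i ≤ j →
      ¬ ws[i].toList < p.toList → p.toList <+: ws[j].toList → p.toList <+: ws[i].toList := by
    intro i j hi hj hij hnlt hpr
    rcases Nat.lt_or_ge i j with h | h
    · exact (List.pairwise_iff_getElem.mp hs i j hi hj h).2 hnlt hpr
    · have : i = j := by omega
      subst this; exact hpr
  have hget : ∀ (i : Int) (h0 : 0 ≤ i) (h1 : i < (ws.length : Int)),
      PySem.List.pyGetD ws i "" = ws[i.toNat]'(by omega) := by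
    intro i h0 h1
    exact PySem.List.pyGetD_eq_getElem ws "" h0 h1
  set n : Int := (ws.length : Int) with hn
  -- first bisection: boundary of 'w < prefix'
  have mono1 : ∀ i j : Int, 0 ≤ i → i ≤ j → j < n →
      (fun w => PySem.Chars.strLt w.toList p.toList) (PySem.List.pyGetD ws j "") = true →
      (fun w => PySem.Chars.strLt w.toList p.toList) (PySem.List.pyGetD ws i "") = true := by
    intro i j h0 hij hjn hj
    rw [hget j (by omega) hjn] at hj
    rw [hget i h0 (by omega)]
    simp only [PySem.Chars.strLt, decide_eq_true_iff] at hj ⊢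
    exact hC1 i.toNat j.toNat (by omega) (by omega) (by omega) hj
  obtain ⟨a1, a2, a3, a4⟩ := pvFirstNot_spec ws
    (fun w => PySem.Chars.strLt w.toList p.toList) (n - 0).toNat 0 n le_rfl le_rfl
    (by omega) mono1
  set start := pvFirstNot ws (fun w => PySem.Chars.strLt w.toList p.toList) 0 n with hstart
  -- second bisection: boundary of 'w starts with prefix' above start
  have mono2 : ∀ i j : Int, start ≤ i → i ≤ j → j < n →
      (fun w => PySem.Str.startswith w p) (PySem.List.pyGetD ws j "") = true →
      (fun w => PySem.Str.startswith w p) (PySem.List.pyGetD ws i "") = true := by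
    intro i j hsi hij hjn hj
    have h0i : 0 ≤ i := le_trans a1 hsi
    rw [hget j (by omega) hjn] at hj
    rw [hget i h0i (by omega)]
    simp only [PySem.Str.startswith_eq, PySem.Chars.startswith_iff] at hj ⊢
    have hnlt : ¬ (ws[i.toNat]'(by omega)).toList < p.toList := by
      have := a4 i hsi (by omega)
      rw [hget i h0i (by omega)] at this
      simp only [PySem.Chars.strLt, decide_eq_false_iff_not] at this
      exact this
    exact hC2 i.toNat j.toNat (by omega) (by omega) (by omega) hnlt hj
  obtain ⟨b1, b2, b3, b4⟩ := pvFirstNot_spec ws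
    (fun w => PySem.Str.startswith w p) (n - start).toNat start n le_rfl a1 a2 mono2
  set e := pvFirstNot ws (fun w => PySem.Str.startswith w p) start n with he
  have halt : linear_search_prefix_alt ws p =
      if e - 1 < start then [-1, -1] else [start, e - 1] := by
    simp only [linear_search_prefix_alt]
    rfl
  rw [halt]
  unfold pvRef
  cases hk : List.findIdx? (pvQ p) ws with
  | none =>
    have hnone := List.findIdx?_eq_none_iff.mp hk
    have hes : e = start := by
      by_contra hne
      have hlt : start < e := lt_of_le_of_ne b1 (Ne.symm hne)
      have := b3 start le_rfl hlt
      rw [hget start a1 (by omega)] at this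
      have hmem : ws[start.toNat]'(by omega) ∈ ws := List.getElem_mem _
      have := hnone _ hmem
      simp only [pvQ] at this
      simp_all
    rw [if_pos (by omega)]
  | some L =>
    obtain ⟨hlen, hqL, hmin⟩ := List.findIdx?_eq_some_iff_getElem.mp hk
    have hLn : (L : Int) < n := by rw [hn]; exact_mod_cast hlen
    have hpref : p.toList <+: ws[L].toList := by
      simpa only [pvQ, PySem.Str.startswith_eq, PySem.Chars.startswith_iff] using hqL
    have hnotlt : ¬ (ws[L].toList < p.toList) := by
      obtain ⟨t, ht⟩ := hpref
      rw [← ht]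
      exact prefix_not_lt p.toList t
    have hstL : start = (L : Int) := by
      rcases lt_trichotomy start (L : Int) with h | h | h
      · exfalso
        have hf := a4 start le_rfl (by omega)
        rw [hget start a1 (by omega)] at hf
        simp only [PySem.Chars.strLt, decide_eq_false_iff_not] at hf
        have hnq := hmin start.toNat (by omega)
        simp only [pvQ, PySem.Str.startswith_eq, PySem.Chars.startswith_iff] at hnq
        exact hnq (hC2 start.toNat L (by omega) hlen (by omega) hf hpref)
      · exact h
      · exfalso
        have ht := a3 (L : Int) (by omega) h
        rw [hget (L : Int) (by omega) hLn] at ht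
        simp only [PySem.Chars.strLt, decide_eq_true_iff, Int.toNat_natCast] at ht
        exact hnotlt ht
    have heL : (L : Int) < e := by
      by_contra hle
      have := b4 (L : Int) (by omega) hLn
      rw [hget (L : Int) (by omega) hLn] at this
      simp only [Int.toNat_natCast] at this
      have hq : PySem.Str.startswith ws[L] p = true := hqL
      simp_all
    have hrun : ((ws.drop (L + 1)).takeWhile (pvQ p)).length = (e - L - 1).toNat := by
      apply takeWhile_length_eq
      · simp only [List.length_drop]; omega
      · intro j hj hjk
        simp only [List.length_drop] at hj
        have : (ws.drop (L + 1))[j] = ws[L + 1 + j]'(by omega) := List.getElem_drop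
        rw [this]
        have hb := b3 ((L : Int) + 1 + (j : Int)) (by omega) (by omega)
        rw [hget _ (by omega) (by omega)] at hb
        simpa only [pvQ, show ((L : Int) + 1 + (j : Int)).toNat = L + 1 + j by omega] using hb
      · intro j hj hjk
        simp only [List.length_drop] at hj
        have : (ws.drop (L + 1))[j] = ws[L + 1 + j]'(by omega) := List.getElem_drop
        rw [this]
        have hb := b4 ((L : Int) + 1 + (j : Int)) (by omega) (by omega)
        rw [hget _ (by omega) (by omega)] at hb
        simpa only [pvQ, show ((L : Int) + 1 + (j : Int)).toNat = L + 1 + j by omega] using hb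
    rw [if_neg (by omega)]
    show [start, e - 1] =
      [((L : Nat) : Int), ((L : Nat) : Int) + ((List.takeWhile (pvQ p) (List.drop (L + 1) ws)).length : Int)]
    rw [hrun, hstL]
    simp only [List.cons.injEq, and_true, true_and]
    omega

-- ===== VERDICT (by name: the statement is the Claim_ definition above) =====
theorem linear_search_prefix_spec : Claim_equal_linear_search_prefix := by
  intro ws p _ hpre
  unfold Spec_linear_search_prefix
  rw [A_eq_ref ws p, B_eq_ref ws p hpre]
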